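-- pv_equiv track=rewrite | github.com/juanital948/practica_estructura1 | estructura.py | mutacion_genetica
-- ===== SOURCE A (Python) =====
-- def mutacion_genetica(secuencia, i = 0):
--     if i == len(secuencia):
--         return ""
--
--     if secuencia[i] == "A":
--         nueva = "T"
--     elif secuencia[i] == "T":
--         nueva = "A"
--     else:
--         nueva = secuencia[i]
--
--     return nueva + mutacion_genetica(secuencia, i + 1)
-- ===== SOURCE B (Python) =====
-- def mutacion_genetica(secuencia, i=0):
--     comp = {"A": "T", "T": "A"}
--     return "".join(comp.get(secuencia[j], secuencia[j]) for j in range(i, len(secuencia)))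
-- ===== Notes on version B (the rewrite author's own statement) =====
-- stated objective: idiomatic
-- what changed: Replaced the recursive concatenation with a single comprehension pass over range(i, len) using a complement dict and a join, avoiding recursion depth limits and repeated string concatenation.
import Mathlib
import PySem

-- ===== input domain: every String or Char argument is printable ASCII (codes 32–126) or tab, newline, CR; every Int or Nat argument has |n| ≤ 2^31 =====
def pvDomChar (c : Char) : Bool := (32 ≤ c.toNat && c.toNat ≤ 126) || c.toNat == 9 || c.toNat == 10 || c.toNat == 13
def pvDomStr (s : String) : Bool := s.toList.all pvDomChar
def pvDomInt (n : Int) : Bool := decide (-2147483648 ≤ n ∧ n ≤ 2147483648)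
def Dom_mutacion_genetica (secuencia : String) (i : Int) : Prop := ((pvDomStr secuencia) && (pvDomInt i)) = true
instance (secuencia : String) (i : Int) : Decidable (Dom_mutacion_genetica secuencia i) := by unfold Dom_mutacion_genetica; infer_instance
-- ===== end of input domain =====

-- B complements A/T in one comprehension pass with a dict and str.join instead of A's
-- character-by-character recursion with string concatenation (objective: idiomatic).

-- ===== PORT A =====
-- A's recursion, on the code-point list; the `none` arm is where Python raises IndexError
-- (secuencia[i] out of range), excluded by Pre_.
def mgA (cs : List Char) (i : Int) : List Char :=
  if i = (cs.length : Int) then []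
  else
    match h : PySem.List.pyGet? cs i with
    | none => []  -- Python: IndexError (outside Pre_)
    | some c =>
      let nueva := if c = 'A' then ['T'] else if c = 'T' then ['A'] else [c]
      nueva ++ mgA cs (i + 1)
termination_by ((cs.length : Int) - i).toNat
decreasing_by
  have hr : PySem.Raise.InRange cs.length i := by
    by_contra hn
    rw [(PySem.List.pyGet?_eq_none_iff cs i).2 hn] at h
    simp at h
  unfold PySem.Raise.InRange at hr
  omega

def mutacion_genetica (secuencia : String) (i : Int) : String :=
  String.ofList (mgA secuencia.toList i)

-- ===== PORT B =====
-- the dict comp = {"A": "T", "T": "A"} from Source B, over code points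
def mgComp : PySem.Dict Char Char := PySem.Dict.ofList [('A', 'T'), ('T', 'A')]

-- the comprehension body: comp.get(secuencia[j], secuencia[j]); the ' ' default arm is
-- where Python would raise IndexError, unreachable for j ∈ range(i, len) under Pre_.
def mgB1 (cs : List Char) (j : Int) : Char :=
  match PySem.List.pyGet? cs j with
  | some c => PySem.Dict.getD mgComp c c
  | none => ' '

def mutacion_genetica_alt (secuencia : String) (i : Int) : String :=
  String.ofList ((PySem.List.pyRange i (secuencia.toList.length : Int) 1).map
    (mgB1 secuencia.toList))

-- ===== PRECONDITION & SPEC =====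
-- A raises IndexError when i > len(secuencia) (the stop test i == len is never reached)
-- and when i < -len(secuencia) (secuencia[i] out of range); exactly those are excluded.
def Pre_mutacion_genetica (secuencia : String) (i : Int) : Prop :=
  -(secuencia.toList.length : Int) ≤ i ∧ i ≤ (secuencia.toList.length : Int)
instance (secuencia : String) (i : Int) : Decidable (Pre_mutacion_genetica secuencia i) := by
  unfold Pre_mutacion_genetica; infer_instance

def pvWitness_mutacion_genetica : String × Int := ("GATTACA", 0)

def Spec_mutacion_genetica (secuencia : String) (i : Int) (out : String) : Prop :=
  out = mutacion_genetica_alt secuencia i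
instance (secuencia : String) (i : Int) (out : String) :
    Decidable (Spec_mutacion_genetica secuencia i out) := by
  unfold Spec_mutacion_genetica; infer_instance

-- ===== CLAIM (what is proved, stated in full; the proofs are below) =====
def Claim_equal_mutacion_genetica : Prop := ∀ (secuencia : String) (i : Int), Dom_mutacion_genetica secuencia i → Pre_mutacion_genetica secuencia i → Spec_mutacion_genetica secuencia i (mutacion_genetica secuencia i)

-- ===== LEMMAS AND PROOFS =====

theorem mgA_eq_map (cs : List Char) (i : Int)
    (h1 : -(cs.length : Int) ≤ i) (h2 : i ≤ (cs.length : Int)) :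
    mgA cs i = (PySem.List.pyRange i (cs.length : Int) 1).map (mgB1 cs) := by
  by_cases he : i = (cs.length : Int)
  · subst he
    rw [mgA, if_pos rfl, PySem.List.pyRange_one_eq_nil (le_refl _)]
    rfl
  · have hlt : i < (cs.length : Int) := lt_of_le_of_ne h2 he
    have hr : PySem.Raise.InRange cs.length i := ⟨h1, hlt⟩
    obtain ⟨c, hc⟩ : ∃ c, PySem.List.pyGet? cs i = some c := by
      cases hg : PySem.List.pyGet? cs i with
      | none => exact absurd ((PySem.List.pyGet?_eq_none_iff cs i).1 hg) (not_not.2 hr)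
      | some c => exact ⟨c, rfl⟩
    have ih := mgA_eq_map cs (i + 1) (by omega) (by omega)
    have hstep : mgA cs i =
        (if c = 'A' then ['T'] else if c = 'T' then ['A'] else [c]) ++ mgA cs (i + 1) := by
      rw [mgA, if_neg he]
      split
      · next hg => rw [hc] at hg; simp at hg
      · next c' hg => rw [hc] at hg; injection hg with h'; rw [h']
    rw [hstep, PySem.List.pyRange_one_cons hlt, List.map_cons, ← ih]
    have hb : mgB1 cs i = PySem.Dict.getD mgComp c c := by
      unfold mgB1; rw [hc]
    rw [hb]
    by_cases hA : c = 'A'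
    · subst hA
      have : PySem.Dict.getD mgComp 'A' 'A' = 'T' := by decide
      rw [this]; rfl
    · by_cases hT : c = 'T'
      · subst hT
        have : PySem.Dict.getD mgComp 'T' 'T' = 'A' := by decide
        rw [this]; rfl
      · simp only [if_neg hA, if_neg hT]
        have : PySem.Dict.getD mgComp c c = c := by
          have hm : mgComp = PySem.Dict.mk [('A', 'T'), ('T', 'A')] := by decide
          rw [hm]
          simp [PySem.Dict.getD, PySem.Dict.get?, Ne.symm hA, Ne.symm hT]
        rw [this]
        rfl
termination_by ((cs.length : Int) - i).toNat
decreasing_by omega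

-- ===== VERDICT (by name: the statement is the Claim_ definition above) =====
theorem mutacion_genetica_spec : Claim_equal_mutacion_genetica := by
  intro s i _ hpre
  unfold Spec_mutacion_genetica mutacion_genetica mutacion_genetica_alt
  rw [mgA_eq_map s.toList i hpre.1 hpre.2]
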